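-- pv_equiv track=rewrite | github.com/dunamismax/scryfall-discord-bot | src/mtg_card_bot/bot.py | _extract_sort_parameters
-- ===== SOURCE A (Python) =====
-- def _extract_sort_parameters(
--     query: str
-- ) -> tuple[str, str | None, str | None]:
--     """Extract order/dir hints from the query and return the cleaned query."""
--     tokens = query.split()
--     order: str | None = None
--     direction: str | None = None
--     remaining_tokens: list[str] = []
--
--     for token in tokens:
--         lower_token = token.lower()
--         if lower_token.startswith(("order:", "sort:")):
--             value = token.split(":", 1)[1].strip().strip("()[]{}.,;'\"")
--             if value:
--                 order = value.lower()
--             continue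
--         if lower_token.startswith(("dir:", "direction:")):
--             value = token.split(":", 1)[1].strip().strip("()[]{}.,;'\"")
--             value_lower = value.lower()
--             if value_lower in {"asc", "desc", "auto"}:
--                 direction = value_lower
--             continue
--         remaining_tokens.append(token)
--
--     cleaned_query = " ".join(remaining_tokens).strip()
--     return cleaned_query, order, direction
-- ===== SOURCE B (Python) =====
-- _ORDER_PREFIXES = ("order:", "sort:")
-- _DIR_PREFIXES = ("dir:", "direction:")
-- _ALL_PREFIXES = _ORDER_PREFIXES + _DIR_PREFIXES
--
--
-- def _value(token):
--     return token.split(":", 1)[1].strip().strip("()[]{}.,;'\"")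
--
--
-- def _extract_sort_parameters(query):
--     tokens = query.split()
--     cleaned_query = " ".join(
--         t for t in tokens if not t.lower().startswith(_ALL_PREFIXES)
--     ).strip()
--
--     order = None
--     for t in reversed(tokens):
--         if t.lower().startswith(_ORDER_PREFIXES):
--             v = _value(t)
--             if v:
--                 order = v.lower()
--                 break
--
--     direction = None
--     for t in reversed(tokens):
--         if t.lower().startswith(_DIR_PREFIXES):
--             v = _value(t).lower()
--             if v in ("asc", "desc", "auto"):
--                 direction = v
--                 break
--
--     return cleaned_query, order, direction
-- ===== Notes on version B (the rewrite author's own statement) =====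
-- stated objective: alternative
-- what changed: Replaces A's single fused loop with three accumulators by a filter-and-join for the cleaned query plus two separate reversed scans (break on first hit) for order and direction, exploiting last-match-wins.
import Mathlib
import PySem

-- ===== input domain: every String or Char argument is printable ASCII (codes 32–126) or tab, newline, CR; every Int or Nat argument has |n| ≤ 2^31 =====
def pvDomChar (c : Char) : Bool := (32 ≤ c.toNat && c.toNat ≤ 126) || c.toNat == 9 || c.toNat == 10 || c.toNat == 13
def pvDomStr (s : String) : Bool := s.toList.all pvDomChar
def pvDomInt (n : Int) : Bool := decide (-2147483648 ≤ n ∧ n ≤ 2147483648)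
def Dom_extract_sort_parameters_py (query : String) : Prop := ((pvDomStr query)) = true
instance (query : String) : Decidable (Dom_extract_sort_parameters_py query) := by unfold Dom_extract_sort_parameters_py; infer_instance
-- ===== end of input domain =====

-- B replaces A's fused three-accumulator loop by a filter + join for the cleaned query and two
-- separate reversed scans (break on first hit) for order and direction: a different decomposition.

-- ===== PORT A =====
-- token.split(":", 1)[1].strip().strip("()[]{}.,;'\"") — the [1] is exact because this is only
-- evaluated on tokens whose prefix contains ':' (so the split has two parts).
def pvStepA (st : Option String × Option String × List String) (token : String) :
    Option String × Option String × List String :=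
  let order := st.1
  let direction := st.2.1
  let remaining := st.2.2
  let lower_token := PySem.Str.lower token
  if PySem.Str.startswith lower_token "order:" || PySem.Str.startswith lower_token "sort:" then
    let value := PySem.Str.stripChars (PySem.Str.strip (((PySem.Str.splitMax? token ":" 1).getD []).getD 1 "")) "()[]{}.,;'\""
    (if value ≠ "" then some (PySem.Str.lower value) else order, direction, remaining)
  else if PySem.Str.startswith lower_token "dir:" || PySem.Str.startswith lower_token "direction:" then
    let value := PySem.Str.stripChars (PySem.Str.strip (((PySem.Str.splitMax? token ":" 1).getD []).getD 1 "")) "()[]{}.,;'\""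
    let value_lower := PySem.Str.lower value
    (order, if value_lower = "asc" ∨ value_lower = "desc" ∨ value_lower = "auto" then some value_lower else direction, remaining)
  else
    (order, direction, remaining ++ [token])

def extract_sort_parameters_py (query : String) : String × Option String × Option String :=
  let tokens := PySem.Str.split₀ query
  let res := tokens.foldl pvStepA (none, none, [])
  (PySem.Str.strip (PySem.Str.join " " res.2.2), res.1, res.2.1)

-- ===== PORT B =====
def pvValueB (token : String) : String :=
  PySem.Str.stripChars (PySem.Str.strip (((PySem.Str.splitMax? token ":" 1).getD []).getD 1 "")) "()[]{}.,;'\""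

def pvIsOrderTok (t : String) : Bool :=
  PySem.Str.startswith (PySem.Str.lower t) "order:" || PySem.Str.startswith (PySem.Str.lower t) "sort:"

def pvIsDirTok (t : String) : Bool :=
  PySem.Str.startswith (PySem.Str.lower t) "dir:" || PySem.Str.startswith (PySem.Str.lower t) "direction:"

-- the 'for t in reversed(tokens): … break' loops of Source B
def pvFindOrderRev : List String → Option String
  | [] => none
  | t :: rest =>
    if pvIsOrderTok t then
      let v := pvValueB t
      if v ≠ "" then some (PySem.Str.lower v) else pvFindOrderRev rest
    else pvFindOrderRev rest

def pvFindDirRev : List String → Option String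
  | [] => none
  | t :: rest =>
    if pvIsDirTok t then
      let v := PySem.Str.lower (pvValueB t)
      if v = "asc" ∨ v = "desc" ∨ v = "auto" then some v else pvFindDirRev rest
    else pvFindDirRev rest

def extract_sort_parameters_py_alt (query : String) : String × Option String × Option String :=
  let tokens := PySem.Str.split₀ query
  let cleaned := PySem.Str.strip (PySem.Str.join " "
    (tokens.filter (fun t => !(pvIsOrderTok t || pvIsDirTok t))))
  (cleaned, pvFindOrderRev tokens.reverse, pvFindDirRev tokens.reverse)

-- ===== PRECONDITION & SPEC =====
def Spec_extract_sort_parameters_py (query : String) (out : String × Option String × Option String) : Prop := out = extract_sort_parameters_py_alt query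
instance (query : String) (out : String × Option String × Option String) : Decidable (Spec_extract_sort_parameters_py query out) := by unfold Spec_extract_sort_parameters_py; infer_instance

-- ===== CLAIM (what is proved, stated in full; the proofs are below) =====
def Claim_equal_extract_sort_parameters_py : Prop := ∀ (query : String), Dom_extract_sort_parameters_py query → Spec_extract_sort_parameters_py query (extract_sort_parameters_py query)

-- ===== LEMMAS AND PROOFS =====

-- the single-token contribution of an order/sort token (what A's first branch adds)
def pvHitO (t : String) : Option String :=
  if pvIsOrderTok t then (if pvValueB t ≠ "" then some (PySem.Str.lower (pvValueB t)) else none) else none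

def pvHitD (t : String) : Option String :=
  if pvIsDirTok t then
    (if PySem.Str.lower (pvValueB t) = "asc" ∨ PySem.Str.lower (pvValueB t) = "desc" ∨ PySem.Str.lower (pvValueB t) = "auto"
      then some (PySem.Str.lower (pvValueB t)) else none)
  else none

theorem pvFindOrderRev_append (xs : List String) (t : String) :
    pvFindOrderRev (xs ++ [t]) = (pvFindOrderRev xs).or (pvHitO t) := by
  induction xs with
  | nil => simp only [List.nil_append, pvFindOrderRev, pvHitO, Option.none_or]
  | cons x xs ih => simp only [List.cons_append, pvFindOrderRev]; split_ifs <;> simp_all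

theorem pvFindDirRev_append (xs : List String) (t : String) :
    pvFindDirRev (xs ++ [t]) = (pvFindDirRev xs).or (pvHitD t) := by
  induction xs with
  | nil => simp only [List.nil_append, pvFindDirRev, pvHitD, Option.none_or]
  | cons x xs ih => simp only [List.cons_append, pvFindDirRev]; split_ifs <;> simp_all

theorem pvPrefix_disjoint {l p q : List Char}
    (hlen : q.length ≤ p.length) (hnp : ¬ q <+: p) (hp : p <+: l) : ¬ q <+: l := by
  intro hq
  exact hnp (List.prefix_of_prefix_length_le hq hp hlen)

theorem pvPrefix_disjoint' {l p q : List Char}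
    (hlen : p.length ≤ q.length) (hnp : ¬ p <+: q) (hp : p <+: l) : ¬ q <+: l := by
  intro hq
  exact hnp (List.prefix_of_prefix_length_le hp hq hlen)

-- a token cannot carry both an order/sort and a dir/direction prefix
theorem pvOrderDir_disjoint (t : String) : pvIsOrderTok t = true → pvIsDirTok t = false := by
  unfold pvIsOrderTok pvIsDirTok
  simp only [PySem.Str.startswith_eq, Bool.eq_false_iff]
  intro h hd
  simp only [Bool.or_eq_true, PySem.Chars.startswith_iff] at h hd
  rcases hd with hd | hd <;> rcases h with h | h
  · exact pvPrefix_disjoint (by decide) (by decide) h hd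
  · exact pvPrefix_disjoint (by decide) (by decide) h hd
  · exact pvPrefix_disjoint' (by decide) (by decide) h hd
  · exact pvPrefix_disjoint' (by decide) (by decide) h hd

theorem pvStepA_eq (o d : Option String) (r : List String) (t : String) :
    pvStepA (o, d, r) t =
      ((pvHitO t).or o, (pvHitD t).or d,
        r ++ (if !(pvIsOrderTok t || pvIsDirTok t) then [t] else [])) := by
  have hod := pvOrderDir_disjoint t
  simp only [pvStepA, pvHitO, pvHitD, pvIsOrderTok, pvIsDirTok, pvValueB] at hod ⊢
  split_ifs <;> simp_all

theorem pvFoldA_eq (tokens : List String) (o d : Option String) (r : List String) :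
    tokens.foldl pvStepA (o, d, r) =
      ((pvFindOrderRev tokens.reverse).or o,
       (pvFindDirRev tokens.reverse).or d,
       r ++ tokens.filter (fun t => !(pvIsOrderTok t || pvIsDirTok t))) := by
  induction tokens generalizing o d r with
  | nil => simp [pvFindOrderRev, pvFindDirRev]
  | cons t rest ih =>
    rw [List.foldl_cons, pvStepA_eq, ih]
    simp only [List.reverse_cons, pvFindOrderRev_append, pvFindDirRev_append, Option.or_assoc,
      List.filter_cons]
    split_ifs <;> simp

-- ===== VERDICT (by name: the statement is the Claim_ definition above) =====
theorem extract_sort_parameters_py_spec : Claim_equal_extract_sort_parameters_py := by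
  intro query _
  unfold Spec_extract_sort_parameters_py extract_sort_parameters_py extract_sort_parameters_py_alt
  simp only [pvFoldA_eq, Option.or_none, List.nil_append]
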